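-- pv_equiv track=rewrite | github.com/moyuan5989/mlx-forge | mlx_forge/inference/constrained.py | _count_unescaped_quotes
-- ===== SOURCE A (Python) =====
-- def _count_unescaped_quotes(text: str) -> int:
--     """Count unescaped double quotes."""
--     count = 0
--     escaped = False
--     for c in text:
--         if escaped:
--             escaped = False
--             continue
--         if c == "\\":
--             escaped = True
--             continue
--         if c == '"':
--             count += 1
--     return count
-- ===== SOURCE B (Python) =====
-- def _count_unescaped_quotes(text: str) -> int:
--     """Count unescaped double quotes."""
--     count = 0
--     while True:
--         i = text.find("\\")
--         if i == -1:
--             return count + text.count('"')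
--         count += text[:i].count('"')
--         text = text[i + 2:]
-- ===== Notes on version B (the rewrite author's own statement) =====
-- stated objective: faster
-- what changed: Replaces the per-character state machine with a string-chopping loop built from library primitives: find the next backslash, add the quote count of the clean prefix via str.count, and drop the backslash together with the character it escapes by slicing.
import Mathlib
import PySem

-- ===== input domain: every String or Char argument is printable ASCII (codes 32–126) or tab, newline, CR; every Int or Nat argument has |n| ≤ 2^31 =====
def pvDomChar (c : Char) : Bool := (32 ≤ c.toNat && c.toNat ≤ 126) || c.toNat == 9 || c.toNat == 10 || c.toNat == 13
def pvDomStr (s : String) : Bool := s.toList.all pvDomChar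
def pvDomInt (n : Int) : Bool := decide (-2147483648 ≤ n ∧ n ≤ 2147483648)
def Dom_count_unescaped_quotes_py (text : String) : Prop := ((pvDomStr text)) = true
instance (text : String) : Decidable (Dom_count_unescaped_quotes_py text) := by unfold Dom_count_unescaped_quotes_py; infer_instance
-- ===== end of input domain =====

-- B replaces A's per-character state machine with a string-chopping loop over library
-- primitives (find / count / slice); measurably faster in CPython (the scan runs in C).

-- ===== PORT A =====
-- A: for c in text, threading the (count, escaped) pair through the loop.
def count_unescaped_quotes_py (text : String) : Int :=
  (text.toList.foldl
    (fun (st : Int × Bool) c =>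
      if st.2 then (st.1, false)
      else if c = '\\' then (st.1, true)
      else if c = '"' then (st.1 + 1, st.2)
      else st)
    (0, false)).1

-- ===== PORT B =====
-- B: while True: i = text.find('\\'); if i == -1: return count + text.count('"');
--    count += text[:i].count('"'); text = text[i+2:]   — the loop's rebinding of
--    `text` becomes recursion on the shrinking text, via PySem find/count/slice.
def pvChop (count : Int) (text : List Char) : Int :=
  let i := PySem.Chars.find text ['\\']
  if h : i = -1 then
    count + (PySem.Chars.count text ['"'] : Int)
  else
    pvChop (count + (PySem.Chars.count (PySem.List.slice text none (some i)) ['"'] : Int))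
      (PySem.List.slice text (some (i + 2)) none)
termination_by text.length
decreasing_by
  have h0 : 0 ≤ PySem.Chars.find text ['\\'] := by
    rcases (PySem.Chars.neg_one_le_find text ['\\']).lt_or_eq with hlt | heq
    · omega
    · exact absurd heq.symm h
  have hmem : (['\\'] : List Char) <:+: text :=
    (PySem.Chars.find_nonneg_iff (s := text) (sub := ['\\'])).1 h0
  have hne : text ≠ [] := by
    rintro rfl; rcases hmem with ⟨p, q, hpq⟩; simp_all [List.append_eq_nil_iff]
  have hlen : 0 < text.length := List.length_pos_iff.2 hne
  have : PySem.List.slice text (some (PySem.Chars.find text ['\\'] + 2)) none =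
      text.drop (PySem.Chars.find text ['\\'] + 2).toNat := by
    apply PySem.List.slice_from; omega
  rw [this]; simp only [List.length_drop]; omega


def count_unescaped_quotes_py_alt (text : String) : Int :=
  pvChop 0 text.toList

-- ===== PRECONDITION & SPEC =====
def Spec_count_unescaped_quotes_py (text : String) (out : Int) : Prop := out = count_unescaped_quotes_py_alt text
instance (text : String) (out : Int) : Decidable (Spec_count_unescaped_quotes_py text out) := by unfold Spec_count_unescaped_quotes_py; infer_instance

-- ===== CLAIM (what is proved, stated in full; the proofs are below) =====
def Claim_equal_count_unescaped_quotes_py : Prop := ∀ (text : String), Dom_count_unescaped_quotes_py text → Spec_count_unescaped_quotes_py text (count_unescaped_quotes_py text)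

-- ===== LEMMAS AND PROOFS =====

-- A's step function, named for the lemmas below.
def pvStepA (st : Int × Bool) (c : Char) : Int × Bool :=
  if st.2 then (st.1, false)
  else if c = '\\' then (st.1, true)
  else if c = '"' then (st.1 + 1, st.2)
  else st

theorem goSing (c : Char) : ∀ (fuel : Nat) (l : List Char) (acc : Nat), l.length ≤ fuel →
    PySem.Chars.count.go [c] fuel l acc = acc + l.count c := by
  intro fuel
  induction fuel with
  | zero => intro l acc h; simp [PySem.Chars.count.go, List.length_eq_zero_iff.1 (Nat.le_zero.1 h)]
  | succ n ih =>
    intro l acc h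
    cases l with
    | nil => simp [PySem.Chars.count.go]
    | cons a t =>
      rw [PySem.Chars.count.go]
      by_cases hc : a = c
      · simp [hc, List.isPrefixOf, ih t (acc+1) (by simpa using h)]; omega
      · simp [List.isPrefixOf, hc, ih t acc (by simpa using h), Ne.symm hc]

theorem pvCountSingleton (c : Char) (s : List Char) :
    PySem.Chars.count s [c] = s.count c := by
  simp [PySem.Chars.count, goSing c s.length s 0 le_rfl]

theorem pvFoldClean (s : List Char) (hs : '\\' ∉ s) (acc : Int) :
    s.foldl pvStepA (acc, false) = (acc + s.count '"', false) := by
  induction s generalizing acc with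
  | nil => simp
  | cons a t ih =>
    have ha : a ≠ '\\' := fun h => hs (h ▸ List.mem_cons_self)
    have ht : '\\' ∉ t := fun h => hs (List.mem_cons_of_mem _ h)
    by_cases hq : a = '"'
    · simp [List.foldl_cons, pvStepA, hq, ih ht]; ring
    · simp [List.foldl_cons, pvStepA, ha, hq, ih ht]

theorem pvChopEq (s : List Char) (acc : Int) :
    pvChop acc s = (s.foldl pvStepA (acc, false)).1 := by
  rw [pvChop]
  by_cases h : PySem.Chars.find s ['\\'] = -1
  · -- no backslash anywhere
    have hmem : '\\' ∉ s := by
      intro hm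
      have : (['\\'] : List Char) <:+: s := by
        rcases List.mem_iff_append.1 hm with ⟨p, q, rfl⟩
        exact ⟨p, q, by simp⟩
      exact (PySem.Chars.find_eq_neg_one_iff (s := s) (sub := ['\\'])).1 h this
    simp [h, pvCountSingleton, pvFoldClean s hmem acc]
  · have h0 : 0 ≤ PySem.Chars.find s ['\\'] := by
      rcases (PySem.Chars.neg_one_le_find s ['\\']).lt_or_eq with hlt | heq
      · omega
      · exact absurd heq.symm h
    set i := PySem.Chars.find s ['\\'] with hi
    set j := i.toNat with hj
    obtain ⟨hpre, hmin⟩ := PySem.Chars.find_spec (s := s) (sub := ['\\']) h0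
    have hjlen : j < s.length := by
      have hle := PySem.Chars.find_le_length s ['\\']
      rcases hpre with ⟨t, ht⟩
      have : s.drop j ≠ [] := by intro hd; rw [hd] at ht; simp at ht
      have := List.length_pos_iff.2 this
      simp [List.length_drop] at this
      omega
    obtain ⟨t, ht⟩ := hpre
    have hdropj : s.drop j = '\\' :: t := by simpa using ht.symm
    have hclean : '\\' ∉ s.take j := by
      intro hm
      obtain ⟨k, hk, hget⟩ := List.mem_iff_getElem.1 hm
      have hk' : k < j ∧ k < s.length := by simpa using hk
      have hkj : k < j := hk'.1
      apply hmin k hkj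
      have hks : k < s.length := hk'.2
      have : s.drop k = s[k] :: s.drop (k+1) := by
        rw [List.drop_eq_getElem_cons hks]
      rw [this]
      have : s[k] = '\\' := by
        rw [← hget]; simp [List.getElem_take]
      rw [this]
      exact ⟨s.drop (k+1), rfl⟩
    -- rewrite the slices
    have hsliceTo : PySem.List.slice s none (some i) = s.take j :=
      PySem.List.slice_to s h0
    have hsliceFrom : PySem.List.slice s (some (i + 2)) none = s.drop (j + 2) := by
      rw [PySem.List.slice_from s (by omega : (0:Int) ≤ i + 2)]
      congr 1
      omega
    have hdrop2 : s.drop (j + 2) = t.drop 1 := by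
      have : s.drop (j + 2) = (s.drop j).drop 2 := by
        rw [List.drop_drop]
      rw [this, hdropj]; rfl
    -- fold over s decomposed
    have hsplit : s = s.take j ++ '\\' :: t := by
      conv_lhs => rw [← List.take_append_drop j s]
      rw [hdropj]
    have hfold : (s.foldl pvStepA (acc, false)) =
        (('\\' :: t).foldl pvStepA (acc + (s.take j).count '"', false)) := by
      conv_lhs => rw [hsplit]
      rw [List.foldl_append, pvFoldClean _ hclean]
    rw [dif_neg h, hsliceTo, hsliceFrom, hdrop2, hfold]
    simp only [List.foldl_cons]
    have hstep : pvStepA (acc + ((s.take j).count '"' : Int), false) '\\' =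
        (acc + ((s.take j).count '"' : Int), true) := by
      simp [pvStepA]
    rw [hstep]
    cases t with
    | nil =>
      rw [pvChop]
      simp [pvCountSingleton, PySem.Chars.find, PySem.Chars.find.go]
    | cons r t' =>
      simp only [List.foldl_cons, List.drop_one, List.tail_cons]
      have hstep2 : pvStepA (acc + ((s.take j).count '"' : Int), true) r =
          (acc + ((s.take j).count '"' : Int), false) := by
        simp [pvStepA]
      rw [hstep2, pvCountSingleton]
      exact pvChopEq t' (acc + ((s.take j).count '"' : Int))
termination_by s.length
decreasing_by
  -- t' is shorter than s: s = take j ++ '\\' :: r :: t'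
  have := congrArg List.length hsplit
  simp at this
  omega

-- ===== VERDICT (by name: the statement is the Claim_ definition above) =====
theorem count_unescaped_quotes_py_spec : Claim_equal_count_unescaped_quotes_py := by
  intro text _
  unfold Spec_count_unescaped_quotes_py count_unescaped_quotes_py count_unescaped_quotes_py_alt
  have h := pvChopEq text.toList 0
  rw [h]
  rfl
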